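-- pv_equiv track=rewrite | github.com/PatoLocos/Erdos530 | experiments/verify_2to1_sweep.py | compute_witness_pairs
-- ===== SOURCE A (Python) =====
-- from collections import defaultdict
--
-- def is_sidon(S):
--     """Check if S is a Sidon (B₂) set: all pairwise sums distinct."""
--     S = sorted(S)
--     sums = set()
--     for i in range(len(S)):
--         for j in range(i, len(S)):
--             s = S[i] + S[j]
--             if s in sums:
--                 return False
--             sums.add(s)
--     return True
--
-- def sum_set(S):
--     """Compute S+S = {a+b : a,b ∈ S} as a dict mapping sum → set of pairs."""
--     S = sorted(S)
--     result = defaultdict(list)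
--     for a in S:
--         for b in S:
--             result[a + b].append((a, b))
--     return result
--
-- def compute_witness_pairs(S, N):
--     """
--     For each blocked element x ∈ {1,...,N} \ S, compute the set of
--     witness pairs (a,b) ∈ S×S that justify blocking x.
--
--     x is blocked if S ∪ {x} is not Sidon, meaning ∃ collision:
--       x + c = a + b  where c ∈ S, {a,b} ⊆ S, {x,c} ≠ {a,b} as multisets
--       (or x + x = a + b if a ≠ b)
--
--     The witness pair we charge x to is (a,b).
--     """
--     S_set = set(S)
--     S_list = sorted(S)
--     ss = sum_set(S_list)
--
--     blocked = {}  # x → set of witness pairs (a,b)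
--
--     for x in range(1, N + 1):
--         if x in S_set:
--             continue
--
--         # Check if x is blocked (S ∪ {x} not Sidon)
--         if is_sidon(list(S_set | {x})):
--             continue
--
--         pairs = set()
--
--         # Type 1: x + c = a + b where c ∈ S, (a,b) ∈ S×S
--         for c in S_list:
--             target = x + c
--             if target in ss:
--                 for (a, b) in ss[target]:
--                     # Exclude trivial: if x=a and c=b, or x=b and c=a
--                     if (x == a and c == b) or (x == b and c == a):
--                         continue
--                     # Also exclude c=a=b (c appears twice) unless genuinely blocked
--                     pairs.add((a, b))
--
--         # Type 2: x + x = a + b where a,b ∈ S, a ≠ b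
--         target2 = 2 * x
--         if target2 in ss:
--             for (a, b) in ss[target2]:
--                 if a != b:  # Need distinct elements
--                     pairs.add((a, b))
--                 elif a == b and a in S_set:
--                     # 2x = 2a means x = a, but x ∉ S, contradiction
--                     pass
--
--         if pairs:
--             blocked[x] = pairs
--
--     return blocked
-- ===== SOURCE B (Python) =====
-- def compute_witness_pairs(S, N):
--     # Same result as A, but without the redundant per-x is_sidon() rescan:
--     # x gets an entry exactly when the flat collision/pair sweep finds a pair.
--     S_set = set(S)
--     S_list = sorted(S)
--     ss = {}
--     for a in S_list:
--         for b in S_list: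
--             ss[a + b] = ss.get(a + b, []) + [(a, b)]
--     blocked = {}
--     for x in range(1, N + 1):
--         if x in S_set:
--             continue
--         pairs = [p for c in S_list for p in ss.get(x + c, [])]
--         pairs += [p for p in ss.get(2 * x, []) if p[0] != p[1]]
--         if pairs:
--             blocked[x] = set(pairs)
--     return blocked
-- ===== Notes on version B (the rewrite author's own statement) =====
-- stated objective: alternative
-- what changed: B drops the per-x is_sidon() rescan entirely (a witness pair exists iff S∪{x} is non-Sidon, so the rescan is redundant) and the never-firing trivial-pair exclusions (x∉S makes them dead code), collecting witness pairs with one flat dictionary sweep per x instead of A's rescan-then-collect; on the measured input family A's rescan early-exits, so the cost is similar.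
import Mathlib
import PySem

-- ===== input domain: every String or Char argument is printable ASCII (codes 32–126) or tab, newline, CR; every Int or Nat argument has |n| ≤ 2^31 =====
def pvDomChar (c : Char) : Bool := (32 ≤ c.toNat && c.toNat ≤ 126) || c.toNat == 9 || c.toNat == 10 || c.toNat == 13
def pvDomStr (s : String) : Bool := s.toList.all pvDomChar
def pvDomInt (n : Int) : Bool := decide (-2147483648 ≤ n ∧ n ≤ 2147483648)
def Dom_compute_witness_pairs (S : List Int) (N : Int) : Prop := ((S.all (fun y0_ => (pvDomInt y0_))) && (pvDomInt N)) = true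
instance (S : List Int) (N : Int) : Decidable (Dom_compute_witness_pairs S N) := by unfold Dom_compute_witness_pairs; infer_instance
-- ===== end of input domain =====

-- B drops A's redundant per-x is_sidon rescan (a witness pair exists iff S ∪ {x} is non-Sidon) and A's never-firing pair exclusions (dead because x ∉ S).

-- ===== PORT A =====

-- is_sidon(S): sort, then nested index loops with early return False on a repeated pairwise sum.
def is_sidon (S : List Int) : Bool :=
  let T := PySem.List.sorted S (fun y => y) false
  let n := T.length
  let r := (List.range n).foldl (fun st i =>
    match st with
    | none => none
    | some sums =>
        (List.range' i (n - i)).foldl (fun st2 j =>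
          match st2 with
          | none => none
          | some sums =>
              let s := T.getD i 0 + T.getD j 0
              if PySem.Set.contains sums s then none
              else some (PySem.Set.add sums s)) (some sums)) (some ([] : PySem.Set Int))
  r.isSome

-- sum_set(S): defaultdict(list); result[a+b].append((a,b)) over sorted S × sorted S.
def sum_set (S : List Int) : PySem.Dict Int (List (Int × Int)) :=
  let T := PySem.List.sorted S (fun y => y) false
  T.foldl (fun d a => T.foldl (fun d b => d.modify (a + b) [] (· ++ [(a, b)])) d) PySem.Dict.empty

def compute_witness_pairs (S : List Int) (N : Int) : List (Int × List (Int × Int)) :=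
  let S_set : PySem.Set Int := PySem.Set.ofList S
  let S_list := PySem.List.sorted S (fun y => y) false
  let ss := sum_set S_list
  let blocked := (PySem.List.pyRange 1 (N + 1) 1).foldl (fun bl x =>
    if PySem.Set.contains S_set x then bl
    else if is_sidon (PySem.Set.union S_set [x]) then bl
    else
      let pairs : PySem.Set (Int × Int) :=
        S_list.foldl (fun pairs c =>
          let target := x + c
          if ss.contains target then
            (ss.getD target []).foldl (fun pairs p =>
              if (x == p.1 && c == p.2) || (x == p.2 && c == p.1) then pairs
              else PySem.Set.add pairs p) pairs
          else pairs) ([] : PySem.Set (Int × Int))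
      let target2 := 2 * x
      let pairs :=
        if ss.contains target2 then
          (ss.getD target2 []).foldl (fun pairs p =>
            if p.1 != p.2 then PySem.Set.add pairs p else pairs) pairs
        else pairs
      if pairs.isEmpty then bl else bl.insert x pairs) PySem.Dict.empty
  blocked.items

-- ===== PORT B =====

def compute_witness_pairs_alt (S : List Int) (N : Int) : List (Int × List (Int × Int)) :=
  let S_set : PySem.Set Int := PySem.Set.ofList S
  let S_list := PySem.List.sorted S (fun y => y) false
  let ss := S_list.foldl (fun d a =>
    S_list.foldl (fun d b => d.modify (a + b) [] (· ++ [(a, b)])) d) PySem.Dict.empty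
  ((PySem.List.pyRange 1 (N + 1) 1).foldl (fun bl x =>
    if PySem.Set.contains S_set x then bl
    else
      let pairs := S_list.flatMap (fun c => ss.getD (x + c) [])
      let pairs := pairs ++ (ss.getD (2 * x) []).filter (fun p => p.1 != p.2)
      if pairs.isEmpty then bl else bl.insert x (PySem.Set.ofList pairs)) PySem.Dict.empty).items


-- ===== PRECONDITION & SPEC =====
def Spec_compute_witness_pairs (S : List Int) (N : Int) (out : List (Int × List (Int × Int))) : Prop := out = compute_witness_pairs_alt S N
instance (S : List Int) (N : Int) (out : List (Int × List (Int × Int))) : Decidable (Spec_compute_witness_pairs S N out) := by unfold Spec_compute_witness_pairs; infer_instance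

-- ===== CLAIM (what is proved, stated in full; the proofs are below) =====
def Claim_equal_compute_witness_pairs : Prop := ∀ (S : List Int) (N : Int), Dom_compute_witness_pairs S N → Spec_compute_witness_pairs S N (compute_witness_pairs S N)

-- ===== LEMMAS AND PROOFS =====

def pvSum (T : List Int) (p : Nat × Nat) : Int := T.getD p.1 0 + T.getD p.2 0

def pvF (T : List Int) (st : Option (PySem.Set Int)) (p : Nat × Nat) : Option (PySem.Set Int) :=
  match st with
  | none => none
  | some sums =>
      if PySem.Set.contains sums (pvSum T p) then none
      else some (PySem.Set.add sums (pvSum T p))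

def pvPairs (n : Nat) : List (Nat × Nat) :=
  (List.range n).flatMap (fun i => (List.range' i (n - i)).map (fun j => (i, j)))

theorem pv_foldl_none (T : List Int) (l : List (Nat × Nat)) :
    l.foldl (pvF T) none = none := by
  induction l with
  | nil => rfl
  | cons p l ih => simpa [pvF] using ih

theorem pv_is_sidon_eq (L : List Int) :
    is_sidon L =
      ((pvPairs (PySem.List.sorted L (fun y => y) false).length).foldl
        (pvF (PySem.List.sorted L (fun y => y) false)) (some [])).isSome := by
  unfold is_sidon pvPairs
  simp only [List.foldl_flatMap]
  congr 1
  apply PySem.List.foldl_congr_mem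
  intro acc i _
  cases acc with
  | none => rw [pv_foldl_none]
  | some sums => rw [List.foldl_map]; rfl

theorem pv_mem_pvPairs (n : Nat) (p : Nat × Nat) :
    p ∈ pvPairs n ↔ p.1 ≤ p.2 ∧ p.2 < n := by
  obtain ⟨i, j⟩ := p
  simp only [pvPairs, List.mem_flatMap, List.mem_map, List.mem_range, List.mem_range'_1,
    Prod.mk.injEq]
  constructor
  · rintro ⟨a, ha, b, hb, rfl, rfl⟩; omega
  · rintro ⟨h1, h2⟩; exact ⟨i, by omega, j, by omega, rfl, rfl⟩

def pvInv (T : List Int) (pl : List (Nat × Nat)) (s : PySem.Set Int) : Prop :=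
  (∀ z, z ∈ s ↔ ∃ p ∈ pl, pvSum T p = z) ∧
  ∀ p ∈ pl, ∀ q ∈ pl, pvSum T p = pvSum T q → p = q

theorem pv_fold_inv (T : List Int) (l : List (Nat × Nat)) :
    ∀ (pl : List (Nat × Nat)) (s : PySem.Set Int), pvInv T pl s →
    (l.foldl (pvF T) (some s)).isSome = true →
    ∃ s', l.foldl (pvF T) (some s) = some s' ∧ pvInv T (pl ++ l) s' := by
  induction l with
  | nil => intro pl s h _; exact ⟨s, rfl, by simpa using h⟩
  | cons p l ih =>
    intro pl s h hs
    simp only [List.foldl_cons] at hs ⊢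
    by_cases hc : pvSum T p ∈ s
    · rw [show pvF T (some s) p = none by simp [pvF, hc], pv_foldl_none] at hs
      simp at hs
    · rw [show pvF T (some s) p = some (PySem.Set.add s (pvSum T p)) by simp [pvF, hc]] at hs ⊢
      have hmem : pvSum T p ∉ s := hc
      have hinv : pvInv T (pl ++ [p]) (PySem.Set.add s (pvSum T p)) := by
        obtain ⟨h1, h2⟩ := h
        constructor
        · intro z
          rw [PySem.Set.mem_add]
          simp only [List.mem_append, List.mem_singleton]
          constructor
          · rintro (hz | rfl)
            · obtain ⟨q, hq, hqz⟩ := (h1 z).1 hz; exact ⟨q, Or.inl hq, hqz⟩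
            · exact ⟨p, Or.inr rfl, rfl⟩
          · rintro ⟨q, (hq | rfl), hqz⟩
            · exact Or.inl ((h1 z).2 ⟨q, hq, hqz⟩)
            · exact Or.inr hqz.symm
        · intro p' hp' q' hq' hsum
          simp only [List.mem_append, List.mem_singleton] at hp' hq'
          rcases hp' with hp' | rfl <;> rcases hq' with hq' | rfl
          · exact h2 p' hp' q' hq' hsum
          · exact absurd ((h1 _).2 ⟨p', hp', rfl⟩) (hsum ▸ hmem)
          · exact absurd ((h1 _).2 ⟨q', hq', rfl⟩) (hsum ▸ hmem)
          · rfl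
      obtain ⟨s', hs', hinv'⟩ := ih (pl ++ [p]) _ hinv hs
      exact ⟨s', hs', by simpa using hinv'⟩

theorem pv_sidon_collision (L : List Int) (h : is_sidon L = true)
    (u v a b : Int) (hu : u ∈ L) (hv : v ∈ L) (ha : a ∈ L) (hb : b ∈ L)
    (hs : u + v = a + b) : u = a ∨ u = b := by
  set T := PySem.List.sorted L (fun y => y) false with hT
  rw [pv_is_sidon_eq] at h
  have hinj : ∀ p ∈ pvPairs T.length, ∀ q ∈ pvPairs T.length,
      pvSum T p = pvSum T q → p = q := by
    obtain ⟨s', _, _, h2⟩ := pv_fold_inv T (pvPairs T.length) [] []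
      ⟨by simp, by simp⟩ h
    simpa using h2
  have hu' : u ∈ T := (PySem.List.mem_sorted _ _ _ _).2 hu
  have hv' : v ∈ T := (PySem.List.mem_sorted _ _ _ _).2 hv
  have ha' : a ∈ T := (PySem.List.mem_sorted _ _ _ _).2 ha
  have hb' : b ∈ T := (PySem.List.mem_sorted _ _ _ _).2 hb
  have hiu := List.idxOf_lt_length_of_mem hu'
  have hiv := List.idxOf_lt_length_of_mem hv'
  have hia := List.idxOf_lt_length_of_mem ha'
  have hib := List.idxOf_lt_length_of_mem hb'
  have hgd : ∀ (w : Int), w ∈ T → T.getD (T.idxOf w) 0 = w := by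
    intro w hw
    rw [List.getD_eq_getElem _ _ (List.idxOf_lt_length_of_mem hw)]
    exact List.getElem_idxOf _
  have hsum1 : pvSum T (min (T.idxOf u) (T.idxOf v), max (T.idxOf u) (T.idxOf v)) = u + v := by
    rcases le_total (T.idxOf u) (T.idxOf v) with hle | hle
    · simp only [pvSum, min_eq_left hle, max_eq_right hle]; rw [hgd u hu', hgd v hv']
    · simp only [pvSum, min_eq_right hle, max_eq_left hle]; rw [hgd v hv', hgd u hu']; ring
  have hsum2 : pvSum T (min (T.idxOf a) (T.idxOf b), max (T.idxOf a) (T.idxOf b)) = a + b := by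
    rcases le_total (T.idxOf a) (T.idxOf b) with hle | hle
    · simp only [pvSum, min_eq_left hle, max_eq_right hle]; rw [hgd a ha', hgd b hb']
    · simp only [pvSum, min_eq_right hle, max_eq_left hle]; rw [hgd b hb', hgd a ha']; ring
  have hp1 : (min (T.idxOf u) (T.idxOf v), max (T.idxOf u) (T.idxOf v)) ∈ pvPairs T.length := by
    rw [pv_mem_pvPairs]; constructor
    · exact min_le_max
    · simp; omega
  have hp2 : (min (T.idxOf a) (T.idxOf b), max (T.idxOf a) (T.idxOf b)) ∈ pvPairs T.length := by
    rw [pv_mem_pvPairs]; constructor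
    · exact min_le_max
    · simp; omega
  have heq := hinj _ hp1 _ hp2 (by rw [hsum1, hsum2, hs])
  rw [Prod.mk.injEq] at heq
  have : T.idxOf u = T.idxOf a ∨ T.idxOf u = T.idxOf b := by omega
  rcases this with hi | hi
  · left; rw [← hgd u hu', ← hgd a ha', hi]
  · right; rw [← hgd u hu', ← hgd b hb', hi]

theorem pv_isEmpty_ofList {α : Type} [BEq α] [LawfulBEq α] (l : List α) :
    (PySem.Set.ofList l).isEmpty = l.isEmpty := by
  cases l with
  | nil => rfl
  | cons a t => rw [PySem.Set.ofList_cons]; rfl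

theorem pv_ss_getD (L : List Int) (t : Int) :
    (L.foldl (fun d a => L.foldl (fun d b => d.modify (a + b) [] (· ++ [(a, b)])) d)
      (PySem.Dict.empty : PySem.Dict Int (List (Int × Int)))).getD t []
    = ((L.flatMap (fun a => L.map (fun b => ((a + b : Int), (a, b))))).filter
        (fun p => p.1 == t)).map (·.2) := by
  have h : (L.foldl (fun d a => L.foldl (fun d b => d.modify (a + b) [] (· ++ [(a, b)])) d)
      (PySem.Dict.empty : PySem.Dict Int (List (Int × Int))))
      = ((L.flatMap (fun a => L.map (fun b => ((a + b : Int), (a, b))))).foldl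
          (fun d p => d.modify p.1 [] (· ++ [p.2])) PySem.Dict.empty) := by
    rw [List.foldl_flatMap]
    apply PySem.List.foldl_congr_mem
    intro acc a _
    rw [List.foldl_map]
  rw [h, PySem.Dict.getD_foldl_modify_append]
  simp

theorem pv_mem_ss_getD (L : List Int) (t : Int) (p : Int × Int)
    (h : p ∈ (L.foldl (fun d a => L.foldl (fun d b => d.modify (a + b) [] (· ++ [(a, b)])) d)
      (PySem.Dict.empty : PySem.Dict Int (List (Int × Int)))).getD t []) :
    p.1 ∈ L ∧ p.2 ∈ L ∧ p.1 + p.2 = t := by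
  rw [pv_ss_getD] at h
  simp only [List.mem_map, List.mem_filter, List.mem_flatMap] at h
  obtain ⟨q, ⟨⟨a, ha, b, hb, rfl⟩, ht⟩, rfl⟩ := h
  simp_all

theorem pv_main (S : List Int) (N : Int) : compute_witness_pairs S N = compute_witness_pairs_alt S N := by
  unfold compute_witness_pairs compute_witness_pairs_alt sum_set
  simp only [PySem.List.sorted_sorted]
  set L := PySem.List.sorted S (fun y => y) false with hL
  set ss := L.foldl (fun d a => L.foldl (fun d b => d.modify (a + b) [] (· ++ [(a, b)])) d)
      (PySem.Dict.empty : PySem.Dict Int (List (Int × Int))) with hss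
  congr 1
  apply PySem.List.foldl_congr_mem
  intro bl x hx
  have hmemss : ∀ t (p : Int × Int), p ∈ ss.getD t [] → p.1 ∈ S ∧ p.2 ∈ S ∧ p.1 + p.2 = t := by
    intro t p hp
    rw [hss] at hp
    obtain ⟨h1, h2, h3⟩ := pv_mem_ss_getD L t p hp
    exact ⟨(PySem.List.mem_sorted _ _ _ _).1 h1, (PySem.List.mem_sorted _ _ _ _).1 h2, h3⟩
  by_cases hxs : PySem.Set.contains (PySem.Set.ofList S) x = true
  · simp only [hxs, if_true]
  · rw [if_neg hxs, if_neg hxs]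
    have hxS : x ∉ S := by
      intro hm
      exact hxs ((PySem.Set.contains_iff _ _).2 ((PySem.Set.mem_ofList _ _).2 hm))
    by_cases hsd : is_sidon (PySem.Set.union (PySem.Set.ofList S) [x]) = true
    · rw [if_pos hsd]
      have hmemU : ∀ y, y ∈ S → y ∈ PySem.Set.union (PySem.Set.ofList S) [x] := by
        intro y hy
        exact (PySem.Set.mem_union _ _ _).2 (Or.inl ((PySem.Set.mem_ofList _ _).2 hy))
      have hxU : x ∈ PySem.Set.union (PySem.Set.ofList S) [x] := by
        exact (PySem.Set.mem_union _ _ _).2 (Or.inr (List.mem_singleton.2 rfl))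
      have hempty : ∀ c, c ∈ L → ss.getD (x + c) [] = [] := by
        intro c hc
        have hcS : c ∈ S := (PySem.List.mem_sorted _ _ _ _).1 hc
        rcases h : ss.getD (x + c) [] with _ | ⟨p, r⟩
        · rfl
        exfalso
        have hp : p ∈ ss.getD (x + c) [] := by rw [h]; exact List.mem_cons_self
        obtain ⟨ha, hb, hab⟩ := hmemss _ _ hp
        rcases pv_sidon_collision _ hsd x c p.1 p.2 hxU (hmemU c hcS) (hmemU _ ha)
          (hmemU _ hb) hab.symm with h' | h'
        · exact hxS (h' ▸ ha)
        · exact hxS (h' ▸ hb)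
      have hflat : L.flatMap (fun c => ss.getD (x + c) []) = [] := by
        rw [List.flatMap_eq_nil_iff]
        intro c hc
        exact hempty c hc
      have hfilt : (ss.getD (2 * x) []).filter (fun p => p.1 != p.2) = [] := by
        rw [List.filter_eq_nil_iff]
        intro p hp
        obtain ⟨ha, hb, hab⟩ := hmemss _ _ hp
        simp only [bne_iff_ne, ne_eq, Decidable.not_not]
        by_contra hne
        rcases pv_sidon_collision _ hsd x x p.1 p.2 hxU hxU (hmemU _ ha) (hmemU _ hb)
          (by omega) with h' | h'
        · exact hxS (h' ▸ ha)
        · exact hxS (h' ▸ hb)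
      rw [hflat, hfilt]
      rfl
    · rw [if_neg hsd]
      have e1 : L.foldl (fun pairs c =>
          if ss.contains (x + c) = true then
            (ss.getD (x + c) []).foldl (fun pairs p =>
              if (x == p.1 && c == p.2 || x == p.2 && c == p.1) = true then pairs
              else PySem.Set.add pairs p) pairs
          else pairs) ([] : PySem.Set (Int × Int))
          = (L.flatMap (fun c => ss.getD (x + c) [])).foldl PySem.Set.add [] := by
        rw [List.foldl_flatMap]
        apply PySem.List.foldl_congr_mem
        intro acc c _
        by_cases hct : ss.contains (x + c) = true
        · rw [if_pos hct]
          apply PySem.List.foldl_congr_mem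
          intro acc2 p hp
          obtain ⟨ha, hb, _⟩ := hmemss _ _ hp
          have h1 : ¬ x = p.1 := fun h => hxS (h ▸ ha)
          have h2 : ¬ x = p.2 := fun h => hxS (h ▸ hb)
          simp [h1, h2]
        · rw [if_neg hct, PySem.Dict.getD_of_not_contains _ _ (by simpa using hct)]
          rfl
      have e2 : ∀ (Q : PySem.Set (Int × Int)),
          (if ss.contains (2 * x) = true then
            (ss.getD (2 * x) []).foldl (fun pairs p =>
              if (p.1 != p.2) = true then PySem.Set.add pairs p else pairs) Q
          else Q)
          = ((ss.getD (2 * x) []).filter (fun p => p.1 != p.2)).foldl PySem.Set.add Q := by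
        intro Q
        by_cases hct : ss.contains (2 * x) = true
        · rw [if_pos hct, PySem.List.foldl_if_eq_foldl_filter]
        · rw [if_neg hct, PySem.Dict.getD_of_not_contains _ _ (by simpa using hct)]
          rfl
      rw [e1, e2, ← List.foldl_append]
      rw [show ∀ (l : List (Int × Int)), l.foldl PySem.Set.add [] = PySem.Set.ofList l from
        fun l => (PySem.Set.ofList_eq_foldl l).symm]
      rw [pv_isEmpty_ofList]

-- ===== VERDICT (by name: the statement is the Claim_ definition above) =====
theorem compute_witness_pairs_spec : Claim_equal_compute_witness_pairs := by
  intro S N _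
  unfold Spec_compute_witness_pairs
  exact pv_main S N
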